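-- pv_equiv track=rewrite | github.com/mt-upc/logit-explanations | src/utils_contributions.py | convert_subwords_word
-- ===== SOURCE A (Python) =====
-- def convert_subwords_word(splited_subword_sent, splited_word_sent):
--     """
--     Given a sentence made of BPE subwords and words (as a string),
--     returns a list of lists where each sub-list contains BPE subwords
--     for the correponding word.
--     """
--     word_to_bpe = [[] for _ in range(len(splited_word_sent))]
--     word_i = 0
--     for bpe_i, token in enumerate(splited_subword_sent):
--         if bpe_i == 0:
--             word_to_bpe[word_i].append(bpe_i)
--         # if bpe_i == 0:
--         #     # First token may use â–
--         #     word_to_bpe[word_i].append(bpe_i)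
--         else:
--             if not token.startswith("##"):
--                 word_i += 1
--             word_to_bpe[word_i].append(bpe_i)
--
--     for word in word_to_bpe:
--         assert len(word) != 0
--
--     #word_to_bpe.append([len(splited_subword_sent)])
--     return word_to_bpe
-- ===== SOURCE B (Python) =====
-- def convert_subwords_word(splited_subword_sent, splited_word_sent):
--     """
--     Given a sentence made of BPE subwords and words (as a string),
--     returns a list of lists where each sub-list contains BPE subwords
--     for the correponding word.
--     """
--     n = len(splited_subword_sent)
--     starts = [i for i, t in enumerate(splited_subword_sent)
--               if i == 0 or not t.startswith("##")]
--     bounds = starts[1:] + [n]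
--     word_to_bpe = [[] for _ in range(len(splited_word_sent))]
--     for gi, (s, e) in enumerate(zip(starts, bounds)):
--         word_to_bpe[gi] = list(range(s, e))
--     for word in word_to_bpe:
--         assert len(word) != 0
--     return word_to_bpe
-- ===== Notes on version B (the rewrite author's own statement) =====
-- stated objective: alternative
-- what changed: B replaces A's stateful single pass (mutable word index, appending each bpe index into the current bucket one by one) by a two-phase decomposition: first collect the word-start positions, then materialise each group as the contiguous range(start, next_start).
import Mathlib
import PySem

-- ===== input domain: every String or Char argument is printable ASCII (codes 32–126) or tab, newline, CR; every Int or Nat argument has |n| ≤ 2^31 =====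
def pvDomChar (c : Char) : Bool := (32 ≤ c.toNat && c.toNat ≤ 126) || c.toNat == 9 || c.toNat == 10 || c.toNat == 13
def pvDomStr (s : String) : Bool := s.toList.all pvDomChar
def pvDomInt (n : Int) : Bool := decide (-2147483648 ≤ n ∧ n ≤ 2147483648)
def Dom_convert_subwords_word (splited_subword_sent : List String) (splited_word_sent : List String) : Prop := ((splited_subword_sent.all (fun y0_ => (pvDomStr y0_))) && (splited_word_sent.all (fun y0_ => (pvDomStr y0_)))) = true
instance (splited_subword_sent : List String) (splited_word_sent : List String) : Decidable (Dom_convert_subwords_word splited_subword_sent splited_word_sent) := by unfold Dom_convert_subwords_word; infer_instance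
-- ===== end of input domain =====

-- B regroups the subword indices in two phases (word-start positions, then contiguous
-- ranges) instead of A's single stateful pass; same cost, different decomposition.

-- ===== PORT A =====
-- Literal transliteration of A's loop: buckets pre-allocated per word, a mutable word
-- index, each bpe index appended into the current bucket.  The trailing `assert` loop
-- only fires outside Pre_, so it contributes nothing on the admitted inputs.
def convert_subwords_word (splited_subword_sent : List String) (splited_word_sent : List String) : List (List Int) :=
  let init : List (List Int) := splited_word_sent.map (fun _ => ([] : List Int))
  let res := (PySem.List.enumerate splited_subword_sent 0).foldl
    (fun (acc : List (List Int) × Nat) p =>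
      if p.1 == 0 then
        (acc.1.modify acc.2 (fun g => g ++ [p.1]), acc.2)
      else
        let wi := if !(PySem.Str.startswith p.2 "##") then acc.2 + 1 else acc.2
        (acc.1.modify wi (fun g => g ++ [p.1]), wi))
    (init, 0)
  res.1

-- ===== PORT B =====
-- Literal transliteration of Source B: collect the word-start positions, then assign each
-- group bucket the contiguous range [start, next start).
def convert_subwords_word_alt (splited_subword_sent : List String) (splited_word_sent : List String) : List (List Int) :=
  let n : Int := splited_subword_sent.length
  let starts : List Int := (PySem.List.enumerate splited_subword_sent 0).filterMap
      (fun p => if p.1 == 0 || !(PySem.Str.startswith p.2 "##") then some p.1 else none)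
  let bounds : List Int := starts.tail ++ [n]
  let init : List (List Int) := splited_word_sent.map (fun _ => ([] : List Int))
  (PySem.List.enumerate (starts.zip bounds) 0).foldl
    (fun acc p => acc.set p.1.toNat (PySem.List.pyRange p.2.1 p.2.2 1)) init

-- ===== PRECONDITION & SPEC =====
-- Pre_ excludes exactly the inputs on which A raises: more word groups among the
-- subwords than there are words (IndexError) or fewer (AssertionError, empty bucket).
def Pre_convert_subwords_word (splited_subword_sent : List String) (splited_word_sent : List String) : Prop :=
  (match splited_subword_sent with
   | [] => 0
   | _ :: ts => 1 + ts.countP (fun t => !(PySem.Str.startswith t "##"))) = splited_word_sent.length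
instance (splited_subword_sent : List String) (splited_word_sent : List String) : Decidable (Pre_convert_subwords_word splited_subword_sent splited_word_sent) := by unfold Pre_convert_subwords_word; infer_instance

def pvWitness_convert_subwords_word : List String × List String := (["he", "##llo", "wor", "##ld", "!"], ["hello", "world", "!"])

def Spec_convert_subwords_word (splited_subword_sent : List String) (splited_word_sent : List String) (out : List (List Int)) : Prop := out = convert_subwords_word_alt splited_subword_sent splited_word_sent
instance (splited_subword_sent : List String) (splited_word_sent : List String) (out : List (List Int)) : Decidable (Spec_convert_subwords_word splited_subword_sent splited_word_sent out) := by unfold Spec_convert_subwords_word; infer_instance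

-- ===== CLAIM (what is proved, stated in full; the proofs are below) =====
def Claim_equal_convert_subwords_word : Prop := ∀ (splited_subword_sent : List String) (splited_word_sent : List String), Dom_convert_subwords_word splited_subword_sent splited_word_sent → Pre_convert_subwords_word splited_subword_sent splited_word_sent → Spec_convert_subwords_word splited_subword_sent splited_word_sent (convert_subwords_word splited_subword_sent splited_word_sent)

-- ===== LEMMAS AND PROOFS =====

-- The groups of subword indices, computed structurally: `pvChunk i ts` returns the
-- indices (from i on) that continue the currently open group, and the closed groups.
def pvChunk : Int → List String → (List Int × List (List Int))
  | _, [] => ([], [])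
  | i, t :: ts =>
    let r := pvChunk (i+1) ts
    if PySem.Str.startswith t "##" then (i :: r.1, r.2) else ([], (i :: r.1) :: r.2)

-- The word-start positions from index i on (token 0 handled separately by the callers).
def pvStarts : Int → List String → List Int
  | _, [] => []
  | i, t :: ts =>
    if PySem.Str.startswith t "##" then pvStarts (i+1) ts else i :: pvStarts (i+1) ts

theorem pv_modify_append (pre : List (List Int)) (a : List Int) (l : List (List Int)) (f : List Int → List Int) :
    (pre ++ a :: l).modify pre.length f = pre ++ f a :: l := by
  induction pre with
  | nil => simp
  | cons x xs ih => simpa using ih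

theorem pvStarts_ge (ts : List String) : ∀ (i : Int), ∀ x ∈ pvStarts i ts, i ≤ x := by
  induction ts with
  | nil => intro i x hx; simp [pvStarts] at hx
  | cons t ts ih =>
    intro i x hx
    simp only [pvStarts] at hx
    rcases h : PySem.Str.startswith t "##" with _ | _ <;> simp only [h] at hx
    · simp only [Bool.false_eq_true, if_false, List.mem_cons] at hx
      rcases hx with rfl | hx
      · exact le_refl _
      · exact le_trans (by omega) (ih (i+1) x hx)
    · exact le_trans (by omega) (ih (i+1) x (by simpa using hx))

theorem pvStarts_length (ts : List String) : ∀ i, (pvStarts i ts).length = ts.countP (fun t => !(PySem.Str.startswith t "##")) := by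
  induction ts with
  | nil => intro i; simp [pvStarts]
  | cons t ts ih =>
    intro i
    simp only [pvStarts, List.countP_cons]
    cases h : PySem.Str.startswith t "##" <;> simp at h <;> simp [h, ih]

theorem pvChunk_length (ts : List String) : ∀ i, (pvChunk i ts).2.length = ts.countP (fun t => !(PySem.Str.startswith t "##")) := by
  induction ts with
  | nil => intro i; simp [pvChunk]
  | cons t ts ih =>
    intro i
    simp only [pvChunk, List.countP_cons]
    cases h : PySem.Str.startswith t "##" <;> simp at h <;> simp [h, ih]

-- Invariant of A's loop: starting from buckets `pre ++ cur :: (m empty buckets)` with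
-- the word index at `pre.length`, the loop extends `cur` by the continuation indices
-- and fills the empty buckets with the closed groups.
theorem pv_loopA (ts : List String) :
    ∀ (i : Int) (pre : List (List Int)) (cur : List Int) (m : Nat),
    1 ≤ i →
    ts.countP (fun t => !(PySem.Str.startswith t "##")) ≤ m →
    (PySem.List.enumerate ts i).foldl
      (fun (acc : List (List Int) × Nat) p =>
        if p.1 == 0 then
          (acc.1.modify acc.2 (fun g => g ++ [p.1]), acc.2)
        else
          let wi := if !(PySem.Str.startswith p.2 "##") then acc.2 + 1 else acc.2
          (acc.1.modify wi (fun g => g ++ [p.1]), wi))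
      (pre ++ cur :: List.replicate m ([] : List Int), pre.length)
    = (pre ++ (cur ++ (pvChunk i ts).1) :: ((pvChunk i ts).2 ++ List.replicate (m - (pvChunk i ts).2.length) ([] : List Int)),
       pre.length + (pvChunk i ts).2.length) := by
  induction ts with
  | nil => intro i pre cur m _ _; simp [pvChunk, PySem.List.enumerate]
  | cons t ts ih =>
    intro i pre cur m hi hm
    rw [PySem.List.enumerate_cons, List.foldl_cons]
    have h0 : ((i == 0) = false) := by simp; omega
    cases h : PySem.Str.startswith t "##"
    · -- a new group starts at i: the next empty bucket is opened
      have hcnt : ts.countP (fun t => !(PySem.Str.startswith t "##")) + 1 ≤ m := by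
        simp only [List.countP_cons, h] at hm; simpa using hm
      obtain ⟨m', rfl⟩ : ∃ m', m = m' + 1 := ⟨m - 1, by omega⟩
      simp only [h0, Bool.false_eq_true, if_false, h, Bool.not_false, if_true]
      have hrepl : List.replicate (m' + 1) ([] : List Int) = [] :: List.replicate m' [] := rfl
      rw [hrepl]
      have hmod : (pre ++ cur :: ([] : List Int) :: List.replicate m' []).modify (pre.length + 1) (fun g => g ++ [i])
          = (pre ++ [cur]) ++ [i] :: List.replicate m' [] := by
        have := pv_modify_append (pre ++ [cur]) [] (List.replicate m' []) (fun g => g ++ [i])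
        simpa using this
      rw [hmod]
      have hlen : pre.length + 1 = (pre ++ [cur]).length := by simp
      rw [hlen]
      rw [ih (i+1) (pre ++ [cur]) [i] m' (by omega) (by omega)]
      simp only [pvChunk, h, Bool.false_eq_true, if_false]
      simp [List.append_assoc]
      omega
    · -- a continuation token: appended to the current bucket
      simp only [h0, Bool.false_eq_true, if_false, h, Bool.not_true, if_false]
      rw [pv_modify_append pre cur (List.replicate m []) (fun g => g ++ [i])]
      rw [ih (i+1) pre (cur ++ [i]) m (by omega) (by simp only [List.countP_cons, h] at hm; simpa using hm)]
      simp only [pvChunk, h, if_true]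
      simp [List.append_assoc]

-- B's start-collection pass computes pvStarts.
theorem pv_starts_filterMap (ts : List String) :
    ∀ (i : Int), 1 ≤ i →
    (PySem.List.enumerate ts i).filterMap
      (fun p => if p.1 == 0 || !(PySem.Str.startswith p.2 "##") then some p.1 else none)
    = pvStarts i ts := by
  induction ts with
  | nil => intro i _; simp [pvStarts, PySem.List.enumerate]
  | cons t ts ih =>
    intro i hi
    rw [PySem.List.enumerate_cons, List.filterMap_cons]
    have h0 : ((i == 0) = false) := by simp; omega
    simp only [pvStarts, h0, Bool.false_or]
    cases h : PySem.Str.startswith t "##"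
    · simp only [h, Bool.not_false, ih (i+1) (by omega)]; simp
    · simp only [h, Bool.not_true, ih (i+1) (by omega)]; simp

-- B's assignment pass: setting positions j, j+1, … of a list of exactly the right
-- length yields the mapped ranges after the untouched prefix.
theorem pv_setAll (l : List (Int × Int)) :
    ∀ (j : Nat) (init : List (List Int)), init.length = j + l.length →
    (PySem.List.enumerate l (j : Int)).foldl
      (fun (acc : List (List Int)) p => acc.set p.1.toNat (PySem.List.pyRange p.2.1 p.2.2 1)) init
    = init.take j ++ l.map (fun q => PySem.List.pyRange q.1 q.2 1) := by
  induction l with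
  | nil =>
    intro j init h
    simp only [List.length_nil, Nat.add_zero] at h
    simp [PySem.List.enumerate, List.take_of_length_le (le_of_eq h)]
  | cons x xs ih =>
    intro j init h
    rw [PySem.List.enumerate_cons, List.foldl_cons]
    have hj : ((j : Int) + 1) = ((j + 1 : Nat) : Int) := by push_cast; ring
    have hlen : (init.set j (PySem.List.pyRange x.1 x.2 1)).length = (j+1) + xs.length := by
      simp only [List.length_set]; simp only [List.length_cons] at h; omega
    simp only [Int.toNat_natCast]
    rw [hj, ih (j+1) _ hlen]
    have hset : (init.set j (PySem.List.pyRange x.1 x.2 1)).take (j+1)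
        = init.take j ++ [PySem.List.pyRange x.1 x.2 1] := by
      rw [List.set_eq_take_append_cons_drop]
      have hjl : j < init.length := by simp at h; omega
      rw [if_pos hjl]
      rw [List.take_append]
      rw [List.take_of_length_le (by simp [Nat.min_eq_left (le_of_lt hjl)])]
      congr 1
      have : (init.take j).length = j := by simp [Nat.min_eq_left (le_of_lt hjl)]
      rw [this]
      simp
    simp [hset]

-- pvChunk described through pvStarts: the open run is a range up to the next start,
-- and the closed groups are the ranges between consecutive starts.
theorem pv_chunkB (ts : List String) :
    ∀ (i : Int),
    (pvChunk i ts).1 = PySem.List.pyRange i ((pvStarts i ts).headD (i + ts.length)) 1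
    ∧ List.zipWith (fun s e => PySem.List.pyRange s e 1) (pvStarts i ts)
        ((pvStarts i ts).tail ++ [i + (ts.length : Int)]) = (pvChunk i ts).2 := by
  induction ts with
  | nil =>
    intro i
    simp [pvChunk, pvStarts, PySem.List.pyRange_one_eq_nil (le_refl i)]
  | cons t ts ih =>
    intro i
    obtain ⟨ih1, ih2⟩ := ih (i+1)
    have hcast : i + ((t :: ts).length : Int) = (i + 1) + (ts.length : Int) := by
      simp only [List.length_cons]; push_cast; ring
    cases h : PySem.Str.startswith t "##"
    · -- new group starts at i
      simp only [pvChunk, pvStarts, h, Bool.false_eq_true, if_false]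
      constructor
      · simp [PySem.List.pyRange_one_eq_nil (le_refl i)]
      · rcases hss : pvStarts (i+1) ts with _ | ⟨s, ss''⟩
        · rw [hss] at ih1 ih2
          have hgs : (pvChunk (i+1) ts).2 = [] := by simpa using ih2.symm
          have hc' : (pvChunk (i+1) ts).1 = PySem.List.pyRange (i+1) ((i+1) + (ts.length : Int)) 1 := by
            simpa using ih1
          rw [hcast, hgs, hc']
          rw [← PySem.List.pyRange_one_cons (show i < (i+1) + (ts.length : Int) by
            have : (0:Int) ≤ (ts.length : Int) := Int.natCast_nonneg _
            omega)]
          simp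
        · rw [hss] at ih1 ih2
          have hs : i + 1 ≤ s := pvStarts_ge ts (i+1) s (by rw [hss]; exact List.mem_cons_self)
          have hc' : (pvChunk (i+1) ts).1 = PySem.List.pyRange (i+1) s 1 := by simpa using ih1
          have h2 : List.zipWith (fun s e => PySem.List.pyRange s e 1) (s :: ss'')
              (ss'' ++ [(i+1) + (ts.length : Int)]) = (pvChunk (i+1) ts).2 := by
            simpa using ih2
          rw [hcast]
          simp only [List.tail_cons, List.cons_append, List.zipWith_cons_cons] at h2 ⊢
          rw [h2, hc', ← PySem.List.pyRange_one_cons (show i < s by omega)]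
    · -- continuation: i joins the current group
      simp only [pvChunk, pvStarts, h, if_true]
      constructor
      · rcases hss : pvStarts (i+1) ts with _ | ⟨s, ss''⟩
        · rw [hss] at ih1
          rw [ih1]
          simp only [List.headD_nil, hcast]
          exact (PySem.List.pyRange_one_cons (show i < (i+1) + (ts.length : Int) by
            have : (0:Int) ≤ (ts.length : Int) := Int.natCast_nonneg _
            omega)).symm
        · have hs : i + 1 ≤ s := pvStarts_ge ts (i+1) s (by rw [hss]; exact List.mem_cons_self)
          rw [hss] at ih1
          rw [ih1]
          simp only [List.headD_cons]
          exact (PySem.List.pyRange_one_cons (show i < s by omega)).symm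
      · rw [hcast]
        exact ih2

theorem pv_map_nil (w : List String) : w.map (fun _ => ([] : List Int)) = List.replicate w.length [] := by
  induction w with
  | nil => rfl
  | cons x xs ih => simp [List.replicate_succ, ih]

theorem pv_map_zip : ∀ (l1 l2 : List Int), ((l1.zip l2).map (fun q => PySem.List.pyRange q.1 q.2 1)) = List.zipWith (fun s e => PySem.List.pyRange s e 1) l1 l2
  | [], _ => by simp
  | _ :: _, [] => by simp
  | a :: l1, b :: l2 => by simp [pv_map_zip l1 l2]

-- ===== VERDICT (by name: the statement is the Claim_ definition above) =====
theorem convert_subwords_word_spec : Claim_equal_convert_subwords_word := by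
  intro subs words _dom hpre
  unfold Spec_convert_subwords_word
  unfold Pre_convert_subwords_word at hpre
  cases subs with
  | nil =>
    have hw : words = [] := by
      simpa using (List.eq_nil_of_length_eq_zero hpre.symm)
    subst hw
    simp [convert_subwords_word, convert_subwords_word_alt, PySem.List.enumerate]
  | cons t0 ts =>
    simp only at hpre
    set cnt := ts.countP (fun t => !(PySem.Str.startswith t "##")) with hcnt
    set c := (pvChunk 1 ts).1 with hc
    set gs := (pvChunk 1 ts).2 with hgs
    set ss := pvStarts 1 ts with hss
    have hgslen : gs.length = cnt := pvChunk_length ts 1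
    have hsslen : ss.length = cnt := pvStarts_length ts 1
    -- A's side
    have hA : convert_subwords_word (t0 :: ts) words = (0 :: c) :: gs := by
      unfold convert_subwords_word
      dsimp only
      rw [pv_map_nil, ← hpre, PySem.List.enumerate_cons, List.foldl_cons]
      simp only [zero_add]
      simp only [BEq.rfl, if_true]
      have hrepl : List.replicate (1 + cnt) ([] : List Int) = [] :: List.replicate cnt [] := by
        rw [Nat.add_comm]; rfl
      rw [hrepl]
      have hmod : (([] :: List.replicate cnt []).modify 0 (fun g => g ++ [(0:Int)]))
          = [] ++ [(0:Int)] :: List.replicate cnt [] := by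
        have := pv_modify_append [] [] (List.replicate cnt ([] : List Int)) (fun g => g ++ [(0:Int)])
        simpa using this
      simp only [hmod]
      have := pv_loopA ts 1 [] [(0:Int)] cnt (le_refl 1) (le_of_eq hcnt.symm)
      simp only [List.length_nil] at this
      rw [this]
      simp [← hc, ← hgs, hgslen]
    rw [hA]
    -- B's side
    have hstarts : (PySem.List.enumerate (t0 :: ts) 0).filterMap
        (fun p => if p.1 == 0 || !(PySem.Str.startswith p.2 "##") then some p.1 else none)
        = 0 :: ss := by
      rw [PySem.List.enumerate_cons, List.filterMap_cons]
      simp only [BEq.rfl, Bool.true_or, if_true, zero_add]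
      rw [pv_starts_filterMap ts 1 (le_refl 1)]
    have hn : ((t0 :: ts).length : Int) = 1 + (ts.length : Int) := by
      simp only [List.length_cons]; push_cast; ring
    unfold convert_subwords_word_alt
    dsimp only
    rw [hstarts, pv_map_nil, ← hpre]
    simp only [List.tail_cons]
    have hziplen : (List.replicate (1 + cnt) ([] : List Int)).length
        = 0 + ((0 :: ss).zip (ss ++ [((t0 :: ts).length : Int)])).length := by
      simp [List.length_zip, hsslen]; omega
    have hfold := pv_setAll ((0 :: ss).zip (ss ++ [((t0 :: ts).length : Int)])) 0
        (List.replicate (1 + cnt) ([] : List Int)) hziplen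
    simp only [Nat.cast_zero] at hfold
    have hrepl1 : List.replicate (1 + cnt) ([] : List Int) = [] :: List.replicate cnt [] := by
      rw [Nat.add_comm]; rfl
    rw [hrepl1] at hfold ⊢
    rw [hfold]
    simp only [List.take_zero, List.nil_append]
    -- reduce zip+map to zipWith and finish with pv_chunkB
    obtain ⟨hB1, hB2⟩ := pv_chunkB ts 1
    rcases hssc : ss with _ | ⟨s, ss''⟩
    · -- single word
      rw [← hss, hssc] at hB1 hB2
      have hgs0 : gs = [] := by rw [hgs, ← hB2]; simp
      have hc0 : c = PySem.List.pyRange 1 (1 + (ts.length : Int)) 1 := by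
        rw [hc, hB1]; simp
      simp only [List.zip_cons_cons, List.zip_nil_left, List.nil_append, List.map_cons, List.map_nil]
      rw [hgs0, hc0, hn]
      rw [PySem.List.pyRange_one_cons (show (0:Int) < 1 + (ts.length : Int) by
        have : (0:Int) ≤ (ts.length : Int) := Int.natCast_nonneg _
        omega)]
      norm_num
    · -- several words
      rw [← hss, hssc] at hB1 hB2
      have hs1 : (1:Int) ≤ s := pvStarts_ge ts 1 s (by rw [← hss, hssc]; exact List.mem_cons_self)
      have hc1 : c = PySem.List.pyRange 1 s 1 := by rw [hc, hB1]; simp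
      have hB2' : List.zipWith (fun s e => PySem.List.pyRange s e 1) (s :: ss'')
          (ss'' ++ [1 + (ts.length : Int)]) = gs := by
        simpa using hB2
      rw [hn]
      simp only [List.cons_append, List.zip_cons_cons, List.map_cons]
      have h01 : (0:Int) :: PySem.List.pyRange 1 s 1 = PySem.List.pyRange 0 s 1 := by
        rw [PySem.List.pyRange_one_cons (show (0:Int) < s by omega)]; norm_num
      rw [hc1, h01]
      congr 1
      rw [pv_map_zip, hB2']
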